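-- pv_equiv track=rewrite | github.com/marakon/hackathon3 | main.py | concatenate_list
-- ===== SOURCE A (Python) =====
-- def concatenate_list(lista):
--     result= ''
--     for element in lista:
--         result += str(element['id'])
--         if element == lista[-1]:
--             break
--         result += ','
--     return result
-- ===== SOURCE B (Python) =====
-- def concatenate_list(lista):
--     return ','.join(str(element['id']) for element in lista)
-- ===== Notes on version B (the rewrite author's own statement) =====
-- stated objective: idiomatic
-- what changed: Replaces A's accumulating loop with an early break and trailing-comma bookkeeping by the standard single-expression ','.join over the id strings; Pre_ restricts to the natural domain where every element carries the 'id' key (outside it A raises KeyError, or returns a truncated value only via the early-break accident while B raises).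
-- intended difference: On non-empty lists whose last element is dict-equal to some earlier element, A's loop breaks at that earlier occurrence and returns only the ids up to it, while B returns all ids joined; joining every element's id is the intended behaviour of the function. — e.g. on concatenate_list([[("id", 1)], [("id", 1)]]): A returns "1", B returns "1,1"
-- outside the precondition, e.g. on concatenate_list([{'id': 1}, {}, {'id': 1}]): A returns '1', B raises KeyError
import Mathlib
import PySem

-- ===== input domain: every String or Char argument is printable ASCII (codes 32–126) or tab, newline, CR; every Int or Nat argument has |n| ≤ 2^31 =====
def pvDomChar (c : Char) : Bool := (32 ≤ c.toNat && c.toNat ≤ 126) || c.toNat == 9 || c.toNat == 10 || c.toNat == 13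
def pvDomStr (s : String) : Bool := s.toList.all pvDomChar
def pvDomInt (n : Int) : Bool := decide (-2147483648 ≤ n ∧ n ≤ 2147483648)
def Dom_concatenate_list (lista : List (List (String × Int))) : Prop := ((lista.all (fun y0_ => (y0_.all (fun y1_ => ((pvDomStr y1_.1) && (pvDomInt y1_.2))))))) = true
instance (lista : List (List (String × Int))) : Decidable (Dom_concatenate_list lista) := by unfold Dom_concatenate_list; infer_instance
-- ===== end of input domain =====

-- B is the idiomatic single join over all id strings; A's early break on a duplicate of the
-- last element is stated as an intended difference (D_ below). Objective: idiomatic.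

-- shared semantic helpers: Python dict '==' (order-insensitive, last write wins) and str(element['id'])
def pyDictEq (d e : List (String × Int)) : Bool :=
  let dd := PySem.Dict.ofList d
  let ee := PySem.Dict.ofList e
  dd.size == ee.size && dd.keys.all (fun k => dd.get? k == ee.get? k)

-- str(element['id']); the 'id' key is present on every element (Pre_ below), so getD's default is never the value
def pvIdStr (e : List (String × Int)) : String :=
  PySem.Int.toStr ((PySem.Dict.ofList e).getD "id" 0)

-- ===== PORT A =====
-- the for-loop with break; `last` is lista[-1] (the loop body only runs when lista ≠ [])
def pvGoA (last : List (String × Int)) : List (List (String × Int)) → String → String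
  | [], result => result
  | e :: rest, result =>
    let r1 := result ++ pvIdStr e
    if pyDictEq e last then r1 else pvGoA last rest (r1 ++ ",")

def concatenate_list (lista : List (List (String × Int))) : String :=
  pvGoA (lista.getLastD []) lista ""

-- ===== PORT B =====
-- ','.join(str(element['id']) for element in lista)
def concatenate_list_alt (lista : List (List (String × Int))) : String :=
  PySem.Str.join "," (lista.map pvIdStr)

-- ===== PRECONDITION & SPEC =====
-- Pre_ restricts to the natural domain where every element carries the 'id' key; outside it
-- A raises KeyError (or, only via the early-break accident described by D_, returns a
-- truncated value while B raises).
def Pre_concatenate_list (lista : List (List (String × Int))) : Prop :=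
  ∀ e ∈ lista, (PySem.Dict.ofList e).contains "id" = true
instance (lista : List (List (String × Int))) : Decidable (Pre_concatenate_list lista) := by
  unfold Pre_concatenate_list; infer_instance

def pvWitness_concatenate_list : (List (List (String × Int))) := [[("id", 1)], [("id", 2)]]

-- On non-empty lists whose last element is dict-equal to some earlier element, A's loop breaks
-- at that earlier occurrence and returns only the ids up to it, while B returns all ids joined;
-- joining every element's id is the intended behaviour.
def D_concatenate_list (lista : List (List (String × Int))) : Prop :=
  ((List.range (lista.length - 1)).any
    (fun i => pyDictEq (lista.getD i []) (lista.getLastD []))) = true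
instance (lista : List (List (String × Int))) : Decidable (D_concatenate_list lista) := by
  unfold D_concatenate_list; infer_instance

def Spec_concatenate_list (lista : List (List (String × Int))) (out : String) : Prop :=
  ¬ D_concatenate_list lista → out = concatenate_list_alt lista
instance (lista : List (List (String × Int))) (out : String) : Decidable (Spec_concatenate_list lista out) := by unfold Spec_concatenate_list; infer_instance

def pvDiffWitness_concatenate_list : (List (List (String × Int))) := [[("id", 1)], [("id", 1)]]
def pvDiffWitnessOut_concatenate_list : String × String := ("1", "1,1")

-- ===== CLAIM (what is proved, stated in full; the proofs are below) =====
def Claim_unchanged_concatenate_list : Prop := ∀ (lista : List (List (String × Int))), Dom_concatenate_list lista → Pre_concatenate_list lista → Spec_concatenate_list lista (concatenate_list lista)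
def Claim_changed_concatenate_list : Prop := Dom_concatenate_list (pvDiffWitness_concatenate_list) ∧ Pre_concatenate_list (pvDiffWitness_concatenate_list) ∧ D_concatenate_list (pvDiffWitness_concatenate_list) ∧ concatenate_list (pvDiffWitness_concatenate_list) = pvDiffWitnessOut_concatenate_list.1 ∧ concatenate_list_alt (pvDiffWitness_concatenate_list) = pvDiffWitnessOut_concatenate_list.2 ∧ pvDiffWitnessOut_concatenate_list.1 ≠ pvDiffWitnessOut_concatenate_list.2
def Claim_exact_concatenate_list : Prop := ∀ (lista : List (List (String × Int))), Dom_concatenate_list lista → Pre_concatenate_list lista → D_concatenate_list lista → concatenate_list lista ≠ concatenate_list_alt lista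

-- ===== LEMMAS AND PROOFS =====

theorem pyDictEq_rfl (d : List (String × Int)) : pyDictEq d d = true := by
  simp [pyDictEq]

theorem join_singleton_str (x : String) : PySem.Str.join "," [x] = x := by
  apply String.toList_inj.mp
  simp [PySem.Str.toList_join, PySem.Chars.join_singleton]

theorem join_cons_str (x : String) (ys : List String) (h : ys ≠ []) :
    PySem.Str.join "," (x :: ys) = x ++ "," ++ PySem.Str.join "," ys := by
  match ys, h with
  | y :: ys', _ =>
    apply String.toList_inj.mp
    simp [PySem.Str.toList_join, PySem.Chars.join_cons_cons]

theorem join_append_str (xs ys : List String) (hx : xs ≠ []) (hy : ys ≠ []) :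
    PySem.Str.join "," (xs ++ ys) = PySem.Str.join "," xs ++ "," ++ PySem.Str.join "," ys := by
  induction xs with
  | nil => exact absurd rfl hx
  | cons x xs ih =>
    cases xs with
    | nil => simp [join_cons_str _ _ hy, join_singleton_str]
    | cons x2 rest =>
      rw [List.cons_append, join_cons_str x ((x2 :: rest) ++ ys) (by simp), ih (by simp),
        join_cons_str x (x2 :: rest) (by simp)]
      simp [String.append_assoc]

-- A's loop, when some element satisfies the break test, is join over the prefix up to findIdx
theorem pvGoA_eq (last : List (String × Int)) :
    ∀ (l : List (List (String × Int))) (acc : String),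
      l.any (fun e => pyDictEq e last) = true →
      pvGoA last l acc =
        acc ++ PySem.Str.join ","
          ((l.take (l.findIdx (fun e => pyDictEq e last) + 1)).map pvIdStr) := by
  intro l
  induction l with
  | nil => intro acc h; simp at h
  | cons e rest ih =>
    intro acc h
    by_cases hp : pyDictEq e last = true
    · simp [pvGoA, hp, List.findIdx_cons, join_singleton_str]
    · have hrest : rest.any (fun e => pyDictEq e last) = true := by
        simp [List.any_cons, hp] at h; simpa using h
      have hrest_ne : rest ≠ [] := by
        intro hnil; rw [hnil] at hrest; simp at hrest
      have hne : (rest.take (rest.findIdx (fun e => pyDictEq e last) + 1)).map pvIdStr ≠ [] := by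
        simp [List.take_eq_nil_iff, hrest_ne]
      rw [show pvGoA last (e :: rest) acc = pvGoA last rest (acc ++ pvIdStr e ++ ",") by
        simp [pvGoA, hp]]
      rw [ih _ hrest]
      simp only [List.findIdx_cons, hp, cond_false, List.take_succ_cons, List.map_cons]
      rw [join_cons_str _ _ hne]
      simp [String.append_assoc]

theorem getLastD_mem (l : List (List (String × Int))) (h : l ≠ []) : l.getLastD [] ∈ l := by
  cases l with
  | nil => simp at h
  | cons a t => simp [List.getLastD]

theorem any_last (lista : List (List (String × Int))) (h : lista ≠ []) :
    lista.any (fun e => pyDictEq e (lista.getLastD [])) = true := by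
  rw [List.any_eq_true]
  exact ⟨lista.getLastD [], getLastD_mem lista h, pyDictEq_rfl _⟩

-- the break index, as an inequality interval
theorem findIdx_lt (l : List (List (String × Int))) (h : l ≠ []) :
    l.findIdx (fun e => pyDictEq e (l.getLastD [])) < l.length :=
  List.findIdx_lt_length_of_exists (by
    rw [← List.any_eq_true]; exact any_last l h)

-- without a duplicate of the last element, the break fires exactly at the last index
theorem findIdx_eq_last (l : List (List (String × Int))) (h : l ≠ [])
    (hnd : ¬ D_concatenate_list l) :
    l.findIdx (fun e => pyDictEq e (l.getLastD [])) = l.length - 1 := by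
  have hlt := findIdx_lt l h
  have hub : l.findIdx (fun e => pyDictEq e (l.getLastD [])) ≥ l.length - 1 := by
    by_contra hc
    push Not at hc
    apply hnd
    unfold D_concatenate_list
    rw [List.any_eq_true]
    refine ⟨l.findIdx (fun e => pyDictEq e (l.getLastD [])), List.mem_range.mpr (by omega), ?_⟩
    have := List.findIdx_getElem (p := fun e => pyDictEq e (l.getLastD [])) (xs := l) (w := hlt)
    rw [List.getD_eq_getElem?_getD, List.getElem?_eq_getElem hlt]
    simpa using this
  omega

-- ===== VERDICT (by name: the statements are the Claim_ definitions above) =====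
theorem concatenate_list_spec : Claim_unchanged_concatenate_list := by
  intro lista _ _
  unfold Spec_concatenate_list
  intro hnd
  match lista with
  | [] => rfl
  | a :: rest =>
    have hne : (a :: rest) ≠ [] := by simp
    unfold concatenate_list
    rw [pvGoA_eq _ _ _ (any_last _ hne), findIdx_eq_last _ hne hnd]
    have : (a :: rest).length - 1 + 1 = (a :: rest).length := by simp
    rw [this, List.take_length]
    simp [concatenate_list_alt]

theorem concatenate_list_changed : Claim_changed_concatenate_list := by
  unfold Claim_changed_concatenate_list; decide

theorem concatenate_list_tight : Claim_exact_concatenate_list := by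
  intro lista _ _ hd heq
  have hne : lista ≠ [] := by
    intro hnil
    rw [hnil] at hd
    simp [D_concatenate_list] at hd
  -- the break index is strictly before the last index
  have hcut : lista.findIdx (fun e => pyDictEq e (lista.getLastD [])) + 1 < lista.length := by
    unfold D_concatenate_list at hd
    rw [List.any_eq_true] at hd
    obtain ⟨i, hi, hp⟩ := hd
    simp [List.mem_range] at hi
    have hil : i < lista.length := by omega
    have hpi : pyDictEq lista[i] (lista.getLastD []) = true := by
      rw [List.getD_eq_getElem?_getD, List.getElem?_eq_getElem hil] at hp
      simpa using hp
    have hle : lista.findIdx (fun e => pyDictEq e (lista.getLastD [])) ≤ i := by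
      by_contra hc
      push Not at hc
      have hfalse := List.not_of_lt_findIdx hc
      simpa using hpi.symm.trans hfalse
    omega
  set cut := lista.findIdx (fun e => pyDictEq e (lista.getLastD [])) with hcutdef
  -- A = join over the prefix, B = A ++ "," ++ join over the (non-empty) rest
  have hA : concatenate_list lista =
      PySem.Str.join "," ((lista.take (cut + 1)).map pvIdStr) := by
    unfold concatenate_list
    rw [pvGoA_eq _ _ _ (any_last _ hne), ← hcutdef]
    exact String.empty_append
  have hsplit : lista.map pvIdStr =
      (lista.take (cut + 1)).map pvIdStr ++ (lista.drop (cut + 1)).map pvIdStr := by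
    rw [← List.map_append, List.take_append_drop]
  have htne : (lista.take (cut + 1)).map pvIdStr ≠ [] := by
    simp [List.take_eq_nil_iff, hne]
  have hdne : (lista.drop (cut + 1)).map pvIdStr ≠ [] := by
    simp [List.drop_eq_nil_iff]
    omega
  have hB : concatenate_list_alt lista =
      concatenate_list lista ++ "," ++
        PySem.Str.join "," ((lista.drop (cut + 1)).map pvIdStr) := by
    rw [hA]
    unfold concatenate_list_alt
    rw [hsplit, join_append_str _ _ htne hdne]
  rw [hB] at heq
  have := congrArg (fun s => s.toList.length) heq
  simp at this
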